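-- pv_equiv track=rewrite | github.com/Crazylqx/cardgame | qxsite/cardgame/cardtype.py | get_plane3with0_val
-- ===== SOURCE A (Python) =====
-- def get_dragon_next(point):
--     if point > 2 and point < 13:
--         return point + 1
--     elif point == 13:
--         return 1
--     else:
--         return -1   # 连不下去了
--
-- def get_plane3with0_val(pt):
--     if len(pt) % 3 != 0:
--         return
--     v = pt[0]
--     for i, val in enumerate(pt):
--         if val != v:
--             return
--         if i % 3 == 2:
--             v = get_dragon_next(v)
--     return pt[0]
-- ===== SOURCE B (Python) =====
-- def get_dragon_next(point):
--     if point > 2 and point < 13: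
--         return point + 1
--     elif point == 13:
--         return 1
--     else:
--         return -1
--
--
-- def get_plane3with0_val(pt):
--     if len(pt) % 3 != 0:
--         return None
--     v = pt[0]
--     expected = []
--     while len(expected) < len(pt):
--         expected += [v, v, v]
--         v = get_dragon_next(v)
--     return pt[0] if pt == expected else None
-- ===== Notes on version B (the rewrite author's own statement) =====
-- stated objective: alternative
-- what changed: Replaces A's indexed scan with in-loop value checks and modular phase updates by explicitly constructing the full expected sequence (three copies of each successive dragon value) and then doing one list equality comparison.
import Mathlib
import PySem

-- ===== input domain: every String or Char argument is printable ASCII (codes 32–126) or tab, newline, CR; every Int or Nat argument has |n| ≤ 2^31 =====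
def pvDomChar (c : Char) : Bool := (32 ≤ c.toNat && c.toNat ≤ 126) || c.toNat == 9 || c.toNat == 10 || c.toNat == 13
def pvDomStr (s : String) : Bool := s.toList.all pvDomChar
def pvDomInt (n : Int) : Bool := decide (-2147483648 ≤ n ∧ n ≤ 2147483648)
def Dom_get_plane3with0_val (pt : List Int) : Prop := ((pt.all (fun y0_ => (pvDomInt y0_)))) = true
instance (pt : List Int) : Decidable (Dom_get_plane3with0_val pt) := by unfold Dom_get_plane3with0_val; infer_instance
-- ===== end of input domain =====

-- B builds the expected sequence explicitly and compares once, instead of A's indexed scan; alternative decomposition, same cost.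

-- ===== PORT A =====
def get_dragon_next (point : Int) : Int :=
  if point > 2 ∧ point < 13 then point + 1
  else if point = 13 then 1
  else -1

-- the 'for i, val in enumerate(pt)' loop of A, carrying (v, i)
def planeLoop (v : Int) (i : Nat) : List Int → Bool
  | [] => true
  | val :: rest =>
      if val ≠ v then false
      else planeLoop (if i % 3 = 2 then get_dragon_next v else v) (i + 1) rest

def get_plane3with0_val (pt : List Int) : Option Int :=
  if pt.length % 3 ≠ 0 then none
  else
    match PySem.List.pyGet? pt 0 with   -- pt subscript 0: IndexError on the empty list (outside Pre_)
    | none => none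
    | some v => if planeLoop v 0 pt then PySem.List.pyGet? pt 0 else none

-- ===== PORT B =====
-- the 'while len(expected) < len(pt)' loop of B: appends [v,v,v] per round
def buildExpected (v : Int) (n : Nat) : List Int :=
  if n = 0 then []
  else v :: v :: v :: buildExpected (get_dragon_next v) (n - 3)
termination_by n
decreasing_by omega

def get_plane3with0_val_alt (pt : List Int) : Option Int :=
  if pt.length % 3 ≠ 0 then none
  else
    match PySem.List.pyGet? pt 0 with   -- pt subscript 0: IndexError on the empty list (outside Pre_)
    | none => none
    | some v => if pt = buildExpected v pt.length then some v else none

-- ===== PRECONDITION & SPEC =====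
-- Pre_ excludes only the empty list, on which A (and B) raise IndexError when reading the first element.
def Pre_get_plane3with0_val (pt : List Int) : Prop := pt ≠ []
instance (pt : List Int) : Decidable (Pre_get_plane3with0_val pt) := by
  unfold Pre_get_plane3with0_val; infer_instance

def pvWitness_get_plane3with0_val : List Int := [4, 4, 4]

def Spec_get_plane3with0_val (pt : List Int) (out : Option Int) : Prop := out = get_plane3with0_val_alt pt
instance (pt : List Int) (out : Option Int) : Decidable (Spec_get_plane3with0_val pt out) := by
  unfold Spec_get_plane3with0_val; infer_instance

-- ===== CLAIM (what is proved, stated in full; the proofs are below) =====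
def Claim_equal_get_plane3with0_val : Prop := ∀ (pt : List Int), Dom_get_plane3with0_val pt → Pre_get_plane3with0_val pt → Spec_get_plane3with0_val pt (get_plane3with0_val pt)

-- ===== LEMMAS AND PROOFS =====
lemma planeLoop_shift (l : List Int) : ∀ (v : Int) (i : Nat),
    planeLoop v (i + 3) l = planeLoop v i l := by
  induction l with
  | nil => intro v i; simp [planeLoop]
  | cons a rest ih =>
      intro v i
      simp only [planeLoop]
      have h3 : (i + 3) % 3 = i % 3 := Nat.add_mod_right i 3
      rw [h3]
      by_cases hav : a ≠ v
      · simp [hav]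
      · rw [if_neg hav, if_neg hav, show i + 3 + 1 = (i + 1) + 3 from by omega]
        exact ih _ _

lemma planeLoop_eq_build : ∀ (n : Nat) (l : List Int) (v : Int), l.length = 3 * n →
    (planeLoop v 0 l = true ↔ l = buildExpected v l.length) := by
  intro n
  induction n with
  | zero =>
      intro l v h
      have : l = [] := List.eq_nil_of_length_eq_zero (by omega)
      subst this
      simp [planeLoop, buildExpected]
  | succ m ih =>
      intro l v h
      match l with
      | a :: b :: c :: rest =>
        have hlen : rest.length = 3 * m := by simp at h; omega
        have hbuild : buildExpected v (a :: b :: c :: rest).length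
            = v :: v :: v :: buildExpected (get_dragon_next v) rest.length := by
          rw [buildExpected]
          simp
        rw [hbuild]
        simp only [planeLoop]
        by_cases ha : a = v
        · by_cases hb : b = v
          · by_cases hc : c = v
            · have hs : planeLoop (get_dragon_next v) 3 rest
                  = planeLoop (get_dragon_next v) 0 rest := planeLoop_shift rest _ 0
              simp [ha, hb, hc, hs, ih rest (get_dragon_next v) hlen]
            · simp [ha, hb, hc]
          · simp [ha, hb]
        · simp [ha]

theorem get_plane3with0_val_eq (pt : List Int) (hpre : pt ≠ []) :
    get_plane3with0_val pt = get_plane3with0_val_alt pt := by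
  unfold get_plane3with0_val get_plane3with0_val_alt
  by_cases hmod : pt.length % 3 = 0
  · rw [if_neg (not_not_intro hmod), if_neg (not_not_intro hmod)]
    match pt, hpre with
    | a :: tl, _ =>
      have hget : PySem.List.pyGet? (a :: tl) (0 : Int) = some a := by
        simp [PySem.List.pyGet?, PySem.List.pyIdx?]
      rw [hget]
      dsimp only
      obtain ⟨n, hn⟩ : ∃ n, (a :: tl).length = 3 * n := ⟨(a :: tl).length / 3, by omega⟩
      have key := planeLoop_eq_build n (a :: tl) a hn
      by_cases hl : planeLoop a 0 (a :: tl) = true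
      · rw [if_pos hl, if_pos (key.mp hl)]
      · rw [if_neg hl, if_neg (fun hc => hl (key.mpr hc))]
  · rw [if_pos hmod, if_pos hmod]

-- ===== VERDICT (by name: the statement is the Claim_ definition above) =====
theorem get_plane3with0_val_spec : Claim_equal_get_plane3with0_val := by
  intro pt _ hpre
  unfold Spec_get_plane3with0_val
  exact get_plane3with0_val_eq pt hpre
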